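-- pv_equiv track=rewrite | github.com/pythoncoderk/2023_July | old/0403_1.py | ranking1
-- ===== SOURCE A (Python) =====
-- def ranking1(records):
--     rec_sort = list(sorted(records, key=lambda r: r["score"], reverse=True))
--     rank = 1
--     count = 0
--     last_score = None
--     for r in rec_sort:
--         if last_score != r["score"]:
--             rank += count
--             count = 0
--             last_score = r["score"]
--         r["rank"] = rank
--         count += 1
--     return rec_sort
-- ===== SOURCE B (Python) =====
-- def ranking1(records):
--     # Same return value as the original; like it, mutates the input dicts in place
--     # (sets r["rank"]); ranks come from the group's start index instead of a
--     # running rank/count/last_score accumulator.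
--     rec_sort = sorted(records, key=lambda r: r["score"], reverse=True)
--
--     def rank_from(i, rest):
--         # rest is the sorted suffix starting at index i; the rank of a group is
--         # the index of its first member, plus one.
--         if not rest:
--             return []
--         s = rest[0]["score"]
--         k = 1
--         while k < len(rest) and rest[k]["score"] == s:
--             k += 1
--         for r in rest[:k]:
--             r["rank"] = i + 1
--         return rest[:k] + rank_from(i + k, rest[k:])
--
--     return rank_from(0, rec_sort)
-- ===== Notes on version B (the rewrite author's own statement) =====
-- stated objective: alternative
-- what changed: Replaces A's running rank/count/last_score accumulator pass with a grouped scan of the sorted list: each equal-score block is cut off in one inner scan and every member gets rank = (index of the block's first element) + 1, so no rank state is threaded between groups.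
-- outside the precondition, e.g. on ranking1([{'name': 1}]): A raises KeyError, B raises KeyError
import Mathlib
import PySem

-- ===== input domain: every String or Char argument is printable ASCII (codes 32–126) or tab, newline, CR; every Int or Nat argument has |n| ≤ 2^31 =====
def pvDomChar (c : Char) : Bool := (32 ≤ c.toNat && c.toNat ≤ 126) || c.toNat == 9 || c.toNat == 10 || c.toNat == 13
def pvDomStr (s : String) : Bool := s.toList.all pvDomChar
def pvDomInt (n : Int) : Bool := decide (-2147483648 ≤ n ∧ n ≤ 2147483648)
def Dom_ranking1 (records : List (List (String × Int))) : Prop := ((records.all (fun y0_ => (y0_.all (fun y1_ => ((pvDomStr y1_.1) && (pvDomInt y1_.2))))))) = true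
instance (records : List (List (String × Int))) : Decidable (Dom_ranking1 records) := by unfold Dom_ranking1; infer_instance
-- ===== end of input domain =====

-- B replaces A's running rank/count/last_score accumulator by a grouped scan whose
-- rank is the group's start index + 1 (objective: simpler decomposition).  Both
-- Pythons mutate the input dicts in place (r["rank"] = …); the equivalence proved
-- here is about the RETURN value.

-- ===== PORT A =====

-- r["score"] (Pre_ guarantees the key is present, so the .getD 0 default is never used)
def pvScore (r : List (String × Int)) : Int :=
  ((PySem.Dict.mk r).get? "score").getD 0

-- r["rank"] = rank  (overwrite in place / append, Python dict assignment)
def pvSetRank (r : List (String × Int)) (rank : Int) : List (String × Int) :=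
  ((PySem.Dict.mk r).insert "rank" rank).items

-- the body of A's for-loop, over the state (rank, count, last_score, output so far)
def pvStepA (st : Int × Int × Option Int × List (List (String × Int)))
    (r : List (String × Int)) : Int × Int × Option Int × List (List (String × Int)) :=
  let (rank, count, last, acc) := st
  let (rank, count, last) :=
    if last ≠ some (pvScore r) then (rank + count, (0 : Int), some (pvScore r))
    else (rank, count, last)
  (rank, count + 1, last, acc ++ [pvSetRank r rank])

def ranking1 (records : List (List (String × Int))) : List (List (String × Int)) :=
  let recSort := PySem.List.sorted records (fun r => pvScore r) true
  (recSort.foldl pvStepA (1, 0, none, [])).2.2.2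

-- ===== PORT B =====

-- rank_from i rest: rest is the sorted suffix starting at index i; the inner
-- while-loop scanning the equal-score prefix is the takeWhile/dropWhile split.
def pvRankFrom (i : Nat) : List (List (String × Int)) → List (List (String × Int))
  | [] => []
  | r :: rest =>
    let s := pvScore r
    let grp := r :: rest.takeWhile (fun x => pvScore x == s)
    grp.map (fun x => pvSetRank x ((i : Int) + 1))
      ++ pvRankFrom (i + grp.length) (rest.dropWhile (fun x => pvScore x == s))
termination_by l => l.length
decreasing_by
  simpa [Nat.lt_succ_iff] using List.length_dropWhile_le (fun x => pvScore x == s) rest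

def ranking1_alt (records : List (List (String × Int))) : List (List (String × Int)) :=
  pvRankFrom 0 (PySem.List.sorted records (fun r => pvScore r) true)

-- ===== PRECONDITION & SPEC =====
-- Pre_ excludes exactly the records lacking a "score" key, on which A raises KeyError.
def Pre_ranking1 (records : List (List (String × Int))) : Prop :=
  (records.all (fun r => (PySem.Dict.mk r).contains "score")) = true
instance (records : List (List (String × Int))) : Decidable (Pre_ranking1 records) := by
  unfold Pre_ranking1; infer_instance

def pvWitness_ranking1 : (List (List (String × Int))) :=
  [[("score", 3), ("name", 1)], [("score", 3)], [("score", 1)]]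

def Spec_ranking1 (records : List (List (String × Int))) (out : List (List (String × Int))) : Prop := out = ranking1_alt records
instance (records : List (List (String × Int))) (out : List (List (String × Int))) : Decidable (Spec_ranking1 records out) := by unfold Spec_ranking1; infer_instance

-- ===== CLAIM (what is proved, stated in full; the proofs are below) =====
def Claim_equal_ranking1 : Prop := ∀ (records : List (List (String × Int))), Dom_ranking1 records → Pre_ranking1 records → Spec_ranking1 records (ranking1 records)

-- ===== LEMMAS AND PROOFS =====

-- A's loop, as a structural recursion producing only the output list
def pvGA (rank count : Int) (last : Option Int) :
    List (List (String × Int)) → List (List (String × Int))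
  | [] => []
  | r :: rest =>
    if last ≠ some (pvScore r) then
      pvSetRank r (rank + count) :: pvGA (rank + count) 1 (some (pvScore r)) rest
    else
      pvSetRank r rank :: pvGA rank (count + 1) last rest

theorem pvFoldA (l : List (List (String × Int))) :
    ∀ (rank count : Int) (last : Option Int) (acc : List (List (String × Int))),
    (l.foldl pvStepA (rank, count, last, acc)).2.2.2 = acc ++ pvGA rank count last l := by
  induction l with
  | nil => intro rank count last acc; simp [pvGA]
  | cons r t ih =>
    intro rank count last acc
    by_cases h : last ≠ some (pvScore r) <;>
      simp [pvStepA, pvGA, h, ih] 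

theorem pvMain (l : List (List (String × Int))) :
    ∀ (rank count : Int) (s : Int) (i : Nat), rank + count = (i : Int) + 1 →
    pvGA rank count (some s) l =
      (l.takeWhile (fun x => pvScore x == s)).map (fun x => pvSetRank x rank)
        ++ pvRankFrom (i + (l.takeWhile (fun x => pvScore x == s)).length)
             (l.dropWhile (fun x => pvScore x == s)) := by
  induction l with
  | nil => intro rank count s i h; simp [pvGA, pvRankFrom]
  | cons r t ih =>
    intro rank count s i h
    by_cases hs : pvScore r = s
    · have hcond : ¬ (some s ≠ some (pvScore r)) := by simp [hs]
      rw [pvGA, if_neg hcond,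
        ih rank (count + 1) s (i + 1) (by push_cast; omega)]
      simp only [List.takeWhile_cons, List.dropWhile_cons, hs, beq_self_eq_true, if_true,
        List.map_cons, List.length_cons, List.cons_append]
      rw [show (i + 1) + (t.takeWhile (fun x => pvScore x == s)).length
            = i + ((t.takeWhile (fun x => pvScore x == s)).length + 1) from by omega]
    · have hcond : (some s ≠ some (pvScore r)) := by simp [Ne.symm hs]
      have hb : (pvScore r == s) = false := by simp [hs]
      have htw : (r :: t).takeWhile (fun x => pvScore x == s) = [] := by
        simp [hb]
      have hdw : (r :: t).dropWhile (fun x => pvScore x == s) = r :: t := by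
        simp [hb]
      rw [pvGA, if_pos hcond, htw, hdw]
      simp only [List.map_nil, List.nil_append, List.length_nil, Nat.add_zero]
      rw [show pvRankFrom i (r :: t) = (r :: t.takeWhile (fun x => pvScore x == pvScore r)).map
            (fun x => pvSetRank x ((i : Int) + 1))
          ++ pvRankFrom (i + (r :: t.takeWhile (fun x => pvScore x == pvScore r)).length)
               (t.dropWhile (fun x => pvScore x == pvScore r)) from by rw [pvRankFrom],
        ih (rank + count) 1 (pvScore r) (i + 1) (by push_cast; omega)]
      simp only [List.map_cons, List.cons_append, List.length_cons]
      rw [show ((i : Int) + 1) = rank + count from by omega,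
        show i + ((t.takeWhile (fun x => pvScore x == pvScore r)).length + 1)
          = (i + 1) + (t.takeWhile (fun x => pvScore x == pvScore r)).length from by omega]

theorem pvTop (l : List (List (String × Int))) :
    pvGA 1 0 none l = pvRankFrom 0 l := by
  cases l with
  | nil => simp [pvGA, pvRankFrom]
  | cons r t =>
    rw [pvGA, if_pos (by simp), show (1 : Int) + 0 = 1 from by norm_num,
      pvMain t 1 1 (pvScore r) 1 (by norm_num),
      show pvRankFrom 0 (r :: t) = (r :: t.takeWhile (fun x => pvScore x == pvScore r)).map
          (fun x => pvSetRank x 1)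
        ++ pvRankFrom ((t.takeWhile (fun x => pvScore x == pvScore r)).length + 1)
             (t.dropWhile (fun x => pvScore x == pvScore r)) from by rw [pvRankFrom]; norm_num]
    simp only [List.map_cons, List.cons_append]
    rw [Nat.add_comm 1]

-- ===== VERDICT (by name: the statement is the Claim_ definition above) =====
theorem ranking1_spec : Claim_equal_ranking1 := by
  intro records _ _
  unfold Spec_ranking1 ranking1 ranking1_alt
  rw [pvFoldA, List.nil_append, pvTop]
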